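-- pv_equiv track=rewrite | github.com/ArchipelagoMW/Archipelago | worlds/tloz_oos/patching/text/encoding.py | build_compact_table
-- ===== SOURCE A (Python) =====
-- def build_compact_table(data: dict[str, list[int]]) -> tuple[list[int], dict[str, int]]:
--     sorted_items = sorted(data.items(), key=lambda kv: -len(kv[1]))
--     compact = []
--     offsets = {}
--
--     for key, seq in sorted_items:
--         for key2 in offsets:
--             string_end = offsets[key2] + len(data[key2])
--             if compact[string_end - len(seq):string_end] == seq:
--                 offset = string_end - len(seq)
--                 break
--         else:
--             offset = len(compact)
--             compact.extend(seq)
--         offsets[key] = offset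
--     assert len(compact) <= 0xffff
--
--     return compact, offsets
-- ===== SOURCE B (Python) =====
-- def build_compact_table(data: dict[str, list[int]]) -> tuple[list[int], dict[str, int]]:
--     # Suffix-dictionary packing: one dict keyed by every suffix of the appended
--     # strings (earliest start position wins) replaces A's inner scan over all
--     # previously placed strings with a slice comparison each.
--     sorted_items = sorted(data.items(), key=lambda kv: -len(kv[1]))
--     compact = []
--     offsets = {}
--     sufmap = {}
--
--     for key, seq in sorted_items:
--         off = sufmap.get(tuple(seq))
--         if off is None:
--             off = len(compact)
--             compact.extend(seq)
--             end = len(compact)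
--             n = len(seq)
--             for k in range(n + 1):
--                 sufmap.setdefault(tuple(seq[n - k:]), end - k)
--         offsets[key] = off
--     assert len(compact) <= 0xffff
--
--     return compact, offsets
-- ===== Notes on version B (the rewrite author's own statement) =====
-- stated objective: faster
-- what changed: A's inner loop rescans every previously placed string and slice-compares it against the new sequence; B instead maintains one dictionary mapping every suffix of the appended strings to its earliest start position, so each item is resolved by a single dictionary lookup.
import Mathlib
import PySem

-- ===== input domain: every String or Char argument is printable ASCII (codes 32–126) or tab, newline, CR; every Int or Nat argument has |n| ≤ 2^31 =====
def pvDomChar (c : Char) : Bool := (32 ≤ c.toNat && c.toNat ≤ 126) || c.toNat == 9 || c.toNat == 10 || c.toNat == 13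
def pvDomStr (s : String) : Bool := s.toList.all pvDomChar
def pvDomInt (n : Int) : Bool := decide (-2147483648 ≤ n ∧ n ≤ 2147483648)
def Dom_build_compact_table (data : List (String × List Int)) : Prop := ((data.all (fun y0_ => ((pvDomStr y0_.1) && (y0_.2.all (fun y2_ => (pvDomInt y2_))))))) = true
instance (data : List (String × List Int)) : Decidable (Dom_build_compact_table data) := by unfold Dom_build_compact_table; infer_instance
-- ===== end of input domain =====

-- B replaces A's inner scan over all previously placed strings (one slice comparison each) by a
-- single dictionary keyed by every suffix of the appended strings (earliest position wins):
-- same return value, A's inner key scan disappears.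

-- ===== PORT A =====
-- `for key2 in offsets: string_end = offsets[key2] + len(data[key2]);
--    if compact[string_end - len(seq):string_end] == seq: offset = string_end - len(seq); break`
def aFind (d : PySem.Dict String (List Int)) (compact : List Int) (offsets : PySem.Dict String Int)
    (seq : List Int) : Option (String × Int) :=
  offsets.items.find? (fun kv =>
    PySem.List.slice compact (some (kv.2 + ((d.getD kv.1 []).length : Int) - (seq.length : Int)))
      (some (kv.2 + ((d.getD kv.1 []).length : Int))) == seq)

-- one iteration of A's outer loop (state: compact, offsets)
def aStep (d : PySem.Dict String (List Int)) (st : List Int × PySem.Dict String Int)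
    (item : String × List Int) : List Int × PySem.Dict String Int :=
  match aFind d st.1 st.2 item.2 with
  | some kv =>
      (st.1, st.2.insert item.1 (kv.2 + ((d.getD kv.1 []).length : Int) - (item.2.length : Int)))
  | none => (st.1 ++ item.2, st.2.insert item.1 (st.1.length : Int))

-- `assert len(compact) <= 0xffff` raises outside Pre_build_compact_table and is otherwise a no-op
def build_compact_table (data : List (String × List Int)) : List Int × (List (String × Int)) :=
  let d := PySem.Dict.ofList data
  let sorted_items := PySem.List.sorted d.items (fun kv => -(kv.2.length : Int)) false
  let st := sorted_items.foldl (aStep d) ([], PySem.Dict.empty)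
  (st.1, st.2.items)

-- ===== PORT B =====
-- one iteration of B's loop (state: compact, offsets, sufmap); `seq[n-k:]` with 0 ≤ n-k ≤ n is
-- `drop (n-k)`, `range(n+1)` over the naturals 0..n is `List.range (n+1)`
def bStep (st : List Int × PySem.Dict String Int × PySem.Dict (List Int) Int)
    (item : String × List Int) : List Int × PySem.Dict String Int × PySem.Dict (List Int) Int :=
  match st.2.2.get? item.2 with
  | some off => (st.1, st.2.1.insert item.1 off, st.2.2)
  | none =>
      let compact' := st.1 ++ item.2
      let sufmap' := (List.range (item.2.length + 1)).foldl
        (fun m k => m.setdefault (item.2.drop (item.2.length - k)) ((compact'.length : Int) - (k : Int))) st.2.2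
      (compact', st.2.1.insert item.1 (st.1.length : Int), sufmap')

-- `assert len(compact) <= 0xffff` raises outside Pre_build_compact_table and is otherwise a no-op
def build_compact_table_alt (data : List (String × List Int)) : List Int × (List (String × Int)) :=
  let d := PySem.Dict.ofList data
  let sorted_items := PySem.List.sorted d.items (fun kv => -(kv.2.length : Int)) false
  let st := sorted_items.foldl bStep ([], PySem.Dict.empty, PySem.Dict.empty)
  (st.1, st.2.1.items)


-- ===== PRECONDITION & SPEC =====
-- Pre_ excludes EXACTLY the inputs on which A's `assert len(compact) <= 0xffff` fails
-- (AssertionError; B keeps the same assert and raises there too): the packed table's length is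
-- the total length of the distinct sequence values of the dict that are NOT a proper suffix of
-- another of its sequence values (those are the only ones appended; suffixes are shared), and
-- Pre_ states that this quantity — computable from the input alone — is ≤ 0xffff.
def Pre_build_compact_table (data : List (String × List Int)) : Prop :=
  (let seqs := PySem.List.dedup (PySem.Dict.ofList data).values
   ((seqs.filter (fun s => !(seqs.any (fun t => s != t && s.isSuffixOf t)))).map
     List.length).sum) ≤ 65535
instance (data : List (String × List Int)) : Decidable (Pre_build_compact_table data) := by
  unfold Pre_build_compact_table; infer_instance

def pvWitness_build_compact_table : (List (String × List Int)) :=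
  [("ab", [1, 2, 3]), ("c", [2, 3]), ("d", [])]

def Spec_build_compact_table (data : List (String × List Int)) (out : List Int × (List (String × Int))) : Prop := out = build_compact_table_alt data
instance (data : List (String × List Int)) (out : List Int × (List (String × Int))) : Decidable (Spec_build_compact_table data out) := by unfold Spec_build_compact_table; infer_instance

-- ===== CLAIM (what is proved, stated in full; the proofs are below) =====
def Claim_equal_build_compact_table : Prop := ∀ (data : List (String × List Int)), Dom_build_compact_table data → Pre_build_compact_table data → Spec_build_compact_table data (build_compact_table data)

-- ===== LEMMAS AND PROOFS =====

def gA (d : PySem.Dict String (List Int)) (s : List Int) (kv : String × Int) : Int :=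
  kv.2 + ((d.getD kv.1 []).length : Int) - (s.length : Int)

def entOk (d : PySem.Dict String (List Int)) (compact : List Int) (m : Nat) (kv : String × Int) : Prop :=
  0 ≤ kv.2 ∧ kv.2.toNat + (d.getD kv.1 []).length ≤ compact.length ∧
  (compact.drop kv.2.toNat).take (d.getD kv.1 []).length = d.getD kv.1 [] ∧
  m ≤ (d.getD kv.1 []).length

def LoopInv (d : PySem.Dict String (List Int)) (m : Nat) (compact : List Int)
    (offsets : PySem.Dict String Int) (sufmap : PySem.Dict (List Int) Int) : Prop :=
  (∀ kv ∈ offsets.items, entOk d compact m kv) ∧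
  (∀ s : List Int, s.length ≤ m → (aFind d compact offsets s).map (gA d s) = sufmap.get? s)

lemma find?_eq_of_unique {p : Nat → Bool} (ks : List Nat) (k0 : Nat) (hmem : k0 ∈ ks)
    (hp : ∀ k ∈ ks, p k = true → k = k0) :
    ks.find? p = if p k0 then some k0 else none := by
  induction ks with
  | nil => cases hmem
  | cons a ks ih =>
    by_cases hpa : p a = true
    · have ha : a = k0 := hp a (by simp) hpa
      subst ha
      simp [hpa]
    · have hne : p a = false := by simpa using hpa
      rw [List.find?_cons, hne]
      rcases List.mem_cons.mp hmem with h | h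
      · subst h
        rw [if_neg (by simp [hne])]
        refine List.find?_eq_none.mpr (fun x hx hpx => ?_)
        exact hpa (by rw [hp x (List.mem_cons_of_mem _ hx) hpx] at hpx; exact hpx)
      · exact ih h (fun k hk hpk => hp k (List.mem_cons_of_mem _ hk) hpk)

lemma get?_foldl_setdefault {κ ν : Type} [BEq κ] [LawfulBEq κ] (f : Nat → κ) (g : Nat → ν)
    (ks : List Nat) (m : PySem.Dict κ ν) (s : κ) :
    (ks.foldl (fun m k => m.setdefault (f k) (g k)) m).get? s
      = (m.get? s).or ((ks.find? (fun k => f k == s)).map g) := by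
  induction ks generalizing m with
  | nil => simp
  | cons a ks ih =>
    rw [List.foldl_cons, ih, List.find?_cons]
    by_cases h : f a = s
    · subst h
      rw [PySem.Dict.get?_setdefault_self]
      simp only [beq_self_eq_true]
      cases hm : m.get? (f a) <;> simp
    · rw [PySem.Dict.get?_setdefault_of_ne m (g a) (fun he => h he.symm)]
      have : (f a == s) = false := by simpa using h
      rw [this]

lemma slice_stable {α : Type} (c t : List α) (a b : Int) (h0 : 0 ≤ a) (h1 : 0 ≤ b)
    (h2 : b.toNat ≤ c.length) :
    PySem.List.slice (c ++ t) (some a) (some b) = PySem.List.slice c (some a) (some b) := by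
  rw [PySem.List.slice_toNat (c ++ t) h0 h1, PySem.List.slice_toNat c h0 h1]
  by_cases ha : a.toNat ≤ c.length
  · rw [List.drop_append_of_le_length ha,
      List.take_append_of_le_length (by simp; omega)]
  · have hab : b.toNat - a.toNat = 0 := by omega
    rw [hab]; simp

lemma find?_congr' {α : Type} {p q : α → Bool} (l : List α) (h : ∀ x ∈ l, p x = q x) :
    l.find? p = l.find? q := by
  induction l with
  | nil => rfl
  | cons a l ih =>
    rw [List.find?_cons, List.find?_cons, h a (by simp)]
    cases hq : q a
    · exact ih (fun x hx => h x (List.mem_cons_of_mem _ hx))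
    · rfl

lemma entOk_mono {d : PySem.Dict String (List Int)} {compact : List Int} {m ℓ : Nat}
    {kv : String × Int} (h : entOk d compact m kv) (hle : ℓ ≤ m) : entOk d compact ℓ kv :=
  ⟨h.1, h.2.1, h.2.2.1, le_trans hle h.2.2.2⟩

lemma entOk_append {d : PySem.Dict String (List Int)} {compact : List Int} {m : Nat}
    {kv : String × Int} (t : List Int) (h : entOk d compact m kv) :
    entOk d (compact ++ t) m kv := by
  obtain ⟨h0, hb, hc, hm⟩ := h
  refine ⟨h0, by simp; omega, ?_, hm⟩
  rw [List.drop_append_of_le_length (by omega), List.take_append_of_le_length (by simp; omega)]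
  exact hc

lemma aFind_append {d : PySem.Dict String (List Int)} {compact : List Int}
    {offsets : PySem.Dict String Int} {m : Nat} (t s : List Int)
    (hent : ∀ kv ∈ offsets.items, entOk d compact m kv) (hs : s.length ≤ m) :
    aFind d (compact ++ t) offsets s = aFind d compact offsets s := by
  unfold aFind
  refine find?_congr' _ (fun kv hkv => ?_)
  obtain ⟨h0, hb, _, hm⟩ := hent kv hkv
  have h2n : ((kv.2.toNat : Int)) = kv.2 := Int.toNat_of_nonneg h0
  rw [slice_stable _ _ _ _ (by omega) (by omega) (by omega)]

lemma loop_eq (d : PySem.Dict String (List Int)) :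
    ∀ (its : List (String × List Int)) (compact : List Int) (offsets : PySem.Dict String Int)
      (sufmap : PySem.Dict (List Int) Int) (m : Nat),
      (∀ it ∈ its, d.getD it.1 [] = it.2) →
      (∀ it ∈ its, offsets.contains it.1 = false) →
      (its.map (·.1)).Nodup →
      (∀ it ∈ its, it.2.length ≤ m) →
      its.Pairwise (fun a b => b.2.length ≤ a.2.length) →
      LoopInv d m compact offsets sufmap →
      its.foldl (aStep d) (compact, offsets) =
        ((its.foldl bStep (compact, offsets, sufmap)).1,
         (its.foldl bStep (compact, offsets, sufmap)).2.1) := by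
  intro its
  induction its with
  | nil => intro compact offsets sufmap m _ _ _ _ _ _; rfl
  | cons hd rest ih =>
    intro compact offsets sufmap m h1 h2 h3 hm hpair hinv
    obtain ⟨key, seq⟩ := hd
    have hm_head : seq.length ≤ m := hm (key, seq) (List.mem_cons_self)
    have hgetkey : d.getD key [] = seq := h1 (key, seq) (List.mem_cons_self)
    have hcontkey : offsets.contains key = false := h2 (key, seq) (List.mem_cons_self)
    have h3' : (rest.map (·.1)).Nodup := (List.nodup_cons.mp h3).2
    have hkeyni : ∀ it ∈ rest, it.1 ≠ key := by
      intro it hit he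
      exact (List.nodup_cons.mp h3).1 (List.mem_map.mpr ⟨it, hit, he⟩)
    have hpair' := (List.pairwise_cons.mp hpair).2
    have hmrest : ∀ it ∈ rest, it.2.length ≤ seq.length :=
      fun it hit => (List.pairwise_cons.mp hpair).1 it hit
    have h1' : ∀ it ∈ rest, d.getD it.1 [] = it.2 := fun it hit => h1 it (List.mem_cons_of_mem _ hit)
    rw [List.foldl_cons, List.foldl_cons]
    cases hsm : sufmap.get? seq with
    | some off =>
      have hfind : (aFind d compact offsets seq).map (gA d seq) = some off := by
        rw [hinv.2 seq hm_head, hsm]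
      obtain ⟨kv, hkv, hval⟩ := Option.map_eq_some_iff.mp hfind
      have hkvmem : kv ∈ offsets.items := List.mem_of_find?_eq_some hkv
      have hkvpred := List.find?_some hkv
      obtain ⟨hkv0, hkvb, hkvc, hkvm⟩ := hinv.1 kv hkvmem
      have h2n : ((kv.2.toNat : Int)) = kv.2 := Int.toNat_of_nonneg hkv0
      have hval' : kv.2 + ((d.getD kv.1 []).length : Int) - (seq.length : Int) = off := hval
      have ha : aStep d (compact, offsets) (key, seq) = (compact, offsets.insert key off) := by
        simp only [aStep, hkv, hval']
      have hb : bStep (compact, offsets, sufmap) (key, seq) = (compact, offsets.insert key off, sufmap) := by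
        simp only [bStep, hsm]
      rw [ha, hb]
      -- the slice equality from kv's predicate
      have hslice : (compact.drop off.toNat).take seq.length = seq := by
        have hpred : PySem.List.slice compact
            (some (kv.2 + ((d.getD kv.1 []).length : Int) - (seq.length : Int)))
            (some (kv.2 + ((d.getD kv.1 []).length : Int))) = seq := eq_of_beq hkvpred
        rw [PySem.List.slice_toNat compact (by omega) (by omega)] at hpred
        have h1n : (kv.2 + ((d.getD kv.1 []).length : Int) - (seq.length : Int)).toNat
            = off.toNat := by omega
        rw [h1n] at hpred
        have h2nn : (kv.2 + ((d.getD kv.1 []).length : Int)).toNat - off.toNat = seq.length := by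
          omega
        rw [h2nn] at hpred
        exact hpred
      refine ih compact (offsets.insert key off) sufmap seq.length h1' ?_ h3' hmrest hpair' ?_
      · intro it hit
        rw [PySem.Dict.contains_insert]
        simp [hkeyni it hit, h2 it (List.mem_cons_of_mem _ hit)]
      constructor
      · intro kv' hkv'
        rcases (PySem.Dict.mem_items_insert offsets key off kv').mp hkv' with he | ⟨hmem, _⟩
        · subst he
          refine ⟨by omega, ?_, ?_, by simp [hgetkey]⟩
          · simp only [hgetkey]; omega
          · simp only [hgetkey]; exact hslice
        · exact entOk_mono (hinv.1 kv' hmem) hm_head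
      · intro s hs
        unfold aFind
        rw [PySem.Dict.items_insert_of_not_contains offsets off hcontkey, List.find?_append]
        have hlookup := hinv.2 s (le_trans hs hm_head)
        cases hold : aFind d compact offsets s with
        | some kv'' =>
          unfold aFind at hold
          rw [hold]
          rw [← hlookup]
          unfold aFind
          rw [hold]
          rfl
        | none =>
          unfold aFind at hold
          rw [hold]
          rw [← hlookup]
          unfold aFind
          rw [hold]
          have hnew : (PySem.List.slice compact
              (some (off + ((d.getD key []).length : Int) - (s.length : Int)))
              (some (off + ((d.getD key []).length : Int))) == s) = false := by
            by_contra hc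
            have hc' : (PySem.List.slice compact
                (some (off + ((d.getD key []).length : Int) - (s.length : Int)))
                (some (off + ((d.getD key []).length : Int))) == s) = true := by
              revert hc; cases (PySem.List.slice compact _ _ == s) <;> simp
            have heq : off + ((d.getD key []).length : Int) = kv.2 + ((d.getD kv.1 []).length : Int) := by
              rw [hgetkey]; omega
            rw [heq] at hc'
            have := List.find?_eq_none.mp hold kv hkvmem
            exact this hc'
          simp [hnew]
    | none =>
      have hfind : aFind d compact offsets seq = none :=
        Option.map_eq_none_iff.mp (by rw [hinv.2 seq hm_head, hsm])
      have ha : aStep d (compact, offsets) (key, seq) =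
          (compact ++ seq, offsets.insert key (compact.length : Int)) := by
        simp only [aStep, hfind]
      have hb : bStep (compact, offsets, sufmap) (key, seq) =
          (compact ++ seq, offsets.insert key (compact.length : Int),
           (List.range (seq.length + 1)).foldl
             (fun m k => m.setdefault (seq.drop (seq.length - k))
               (((compact ++ seq).length : Int) - (k : Int))) sufmap) := by
        simp only [bStep, hsm]
      rw [ha, hb]
      refine ih _ _ _ seq.length h1' ?_ h3' hmrest hpair' ?_
      · intro it hit
        rw [PySem.Dict.contains_insert]
        simp [hkeyni it hit, h2 it (List.mem_cons_of_mem _ hit)]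
      constructor
      · intro kv' hkv'
        rcases (PySem.Dict.mem_items_insert offsets key _ kv').mp hkv' with he | ⟨hmem, _⟩
        · subst he
          refine ⟨by positivity, ?_, ?_, by simp [hgetkey]⟩
          · simp [hgetkey]
          · simp only [hgetkey, Int.toNat_natCast, List.drop_left]
            exact List.take_length
        · exact entOk_append seq (entOk_mono (hinv.1 kv' hmem) hm_head)
      · intro s hs
        rw [get?_foldl_setdefault]
        unfold aFind
        rw [PySem.Dict.items_insert_of_not_contains offsets _ hcontkey, List.find?_append]
        have hfc : offsets.items.find? (fun kv =>
            PySem.List.slice (compact ++ seq) (some (kv.2 + ((d.getD kv.1 []).length : Int) - (s.length : Int)))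
              (some (kv.2 + ((d.getD kv.1 []).length : Int))) == s)
            = aFind d compact offsets s := aFind_append seq s hinv.1 (le_trans hs hm_head)
        have hlookup := hinv.2 s (le_trans hs hm_head)
        -- the unique-length find? on the range
        have hrange : (List.range (seq.length + 1)).find? (fun k => seq.drop (seq.length - k) == s)
            = if (seq.drop (seq.length - s.length) == s) then some s.length else none := by
          refine find?_eq_of_unique _ s.length (List.mem_range.mpr (by omega)) ?_
          intro k hk hpk
          have hk' : k ≤ seq.length := by
            have := List.mem_range.mp hk; omega
          have hlen : (seq.drop (seq.length - k)).length = k := by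
            rw [List.length_drop]; omega
          have hds : seq.drop (seq.length - k) = s := eq_of_beq hpk
          rw [← hds, hlen]
        rw [hfc, hrange]
        cases hold : aFind d compact offsets s with
        | some kv'' =>
          rw [hold] at hlookup
          rw [← hlookup]
          simp
        | none =>
          rw [hold] at hlookup
          rw [← hlookup]
          simp only [Option.map_none, Option.none_or, List.find?_singleton]
          have hslice' : PySem.List.slice (compact ++ seq)
              (some ((compact.length : Int) + ((d.getD key []).length : Int) - (s.length : Int)))
              (some ((compact.length : Int) + ((d.getD key []).length : Int)))
              = seq.drop (seq.length - s.length) := by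
            rw [hgetkey]
            rw [PySem.List.slice_toNat (compact ++ seq) (by omega) (by omega)]
            have e1 : ((compact.length : Int) + (seq.length : Int) - (s.length : Int)).toNat
                = compact.length + (seq.length - s.length) := by omega
            have e2 : ((compact.length : Int) + (seq.length : Int)).toNat
                - ((compact.length : Int) + (seq.length : Int) - (s.length : Int)).toNat
                = s.length := by omega
            rw [e2, e1, List.drop_length_add_append]
            exact List.take_of_length_le (by rw [List.length_drop]; omega)
          rw [hslice']
          by_cases hmatch : seq.drop (seq.length - s.length) = s
          · rw [hmatch]
            simp only [beq_self_eq_true, if_pos, Option.map_some, gA, hgetkey]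
            congr 2
            simp only [List.length_append]
            push_cast
            ring
          · have hb1 : (seq.drop (seq.length - s.length) == s) = false := by
              simpa using hmatch
            rw [hb1]
            simp

lemma le_foldr_max (l : List Nat) : ∀ x ∈ l, x ≤ l.foldr max 0 := by
  induction l with
  | nil => simp
  | cons a l ih =>
    intro x hx
    rcases List.mem_cons.mp hx with h | h
    · subst h; exact le_max_left _ _
    · exact le_trans (ih x h) (le_max_right _ _)

theorem build_eq (data : List (String × List Int)) :
    build_compact_table data = build_compact_table_alt data := by
  unfold build_compact_table build_compact_table_alt
  set d := PySem.Dict.ofList data with hd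
  set its := PySem.List.sorted d.items (fun kv => -(kv.2.length : Int)) false with hits
  have hperm : its.Perm d.items := PySem.List.sorted_perm _ _ _
  have hnodk : d.keys.Nodup := PySem.Dict.nodup_keys_ofList data
  have h1 : ∀ it ∈ its, d.getD it.1 [] = it.2 := by
    intro it hit
    have hmem : (it.1, it.2) ∈ d.items := by
      simpa using (PySem.List.mem_sorted _ _ _ _).mp hit
    exact PySem.Dict.getD_of_mem_items d hmem hnodk []
  have h3 : (its.map (·.1)).Nodup := by
    have hp := hperm.map (·.1)
    exact hp.nodup_iff.mpr hnodk
  have hm : ∀ it ∈ its, it.2.length ≤ (its.map (fun it => it.2.length)).foldr max 0 :=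
    fun it hit => le_foldr_max _ _ (List.mem_map_of_mem hit)
  have hpair : its.Pairwise (fun a b => b.2.length ≤ a.2.length) := by
    have hp := PySem.List.sorted_pairwise d.items (fun kv => -(kv.2.length : Int))
    exact hp.imp (by intro a b h; omega)
  have hinv : LoopInv d ((its.map (fun it => it.2.length)).foldr max 0) []
      PySem.Dict.empty PySem.Dict.empty := by
    constructor
    · intro kv hkv
      simp [show (PySem.Dict.empty : PySem.Dict String Int).items = [] from rfl] at hkv
    · intro s _
      simp [aFind, show (PySem.Dict.empty : PySem.Dict String Int).items = [] from rfl,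
        PySem.Dict.get?_empty]
  have h2 : ∀ it ∈ its, (PySem.Dict.empty : PySem.Dict String Int).contains it.1 = false := by
    intro it _; simp
  have hmain := loop_eq d its [] PySem.Dict.empty PySem.Dict.empty _ h1 h2 h3 hm hpair hinv
  show ((its.foldl (aStep d) ([], PySem.Dict.empty)).1,
        (its.foldl (aStep d) ([], PySem.Dict.empty)).2.items)
      = ((its.foldl bStep ([], PySem.Dict.empty, PySem.Dict.empty)).1,
         (its.foldl bStep ([], PySem.Dict.empty, PySem.Dict.empty)).2.1.items)
  rw [hmain]


-- ===== VERDICT (by name: the statement is the Claim_ definition above) =====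
theorem build_compact_table_spec : Claim_equal_build_compact_table := by
  intro data _ _
  unfold Spec_build_compact_table
  exact build_eq data
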